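-- pv_equiv track=rewrite | github.com/eddmpython/dartlab | src/dartlab/engines/ai/eval/diagnoser.py | mapCodeImpact
-- ===== SOURCE A (Python) =====
-- from typing import Any
--
-- _FILE_CASE_IMPACT: dict[str, list[str]] = {
--     "context/builder.py": ["*"],
--     "context/finance_context.py": ["analyst.*", "investor.*", "accountant.*"],
--     "conversation/templates/analysis_rules.py": ["*"],
--     "conversation/prompts.py": ["*"],
--     "runtime/pipeline.py": ["analyst.*", "investor.*", "accountant.*"],
--     "tools/recipes.py": ["analyst.*", "investor.*"],
--     "tools/defaults/analysis.py": ["analyst.*", "investor.*"],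
--     "tools/defaults/market.py": ["investor.*", "analyst.*"],
-- }
--
-- def mapCodeImpact(changedFiles: list[str], cases: list[dict[str, Any]]) -> list[str]:
--     """변경된 파일 → 영향받는 케이스 ID 반환."""
--     impactPatterns: set[str] = set()
--     for f in changedFiles:
--         for key, patterns in _FILE_CASE_IMPACT.items():
--             if key in f.replace("\\", "/"):
--                 impactPatterns.update(patterns)
--
--     if "*" in impactPatterns:
--         return [c.get("id", "") for c in cases]
--
--     import fnmatch
--
--     impacted: list[str] = []
--     for c in cases:
--         caseId = c.get("id", "")
--         for pat in impactPatterns: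
--             if fnmatch.fnmatch(caseId, pat):
--                 impacted.append(caseId)
--                 break
--     return impacted
-- ===== SOURCE B (Python) =====
-- # Inverted index: case-id prefix -> the files that trigger it (and the files that
-- # trigger "everything"); plain startswith instead of fnmatch on the fixed patterns.
-- _STAR_TRIGGERS = (
--     "context/builder.py",
--     "conversation/templates/analysis_rules.py",
--     "conversation/prompts.py",
-- )
-- _PREFIX_TRIGGERS = [
--     ("analyst.", ("context/finance_context.py", "runtime/pipeline.py",
--                   "tools/recipes.py", "tools/defaults/analysis.py",
--                   "tools/defaults/market.py")),
--     ("investor.", ("context/finance_context.py", "runtime/pipeline.py",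
--                    "tools/recipes.py", "tools/defaults/analysis.py",
--                    "tools/defaults/market.py")),
--     ("accountant.", ("context/finance_context.py", "runtime/pipeline.py")),
-- ]
--
-- def mapCodeImpact(changedFiles, cases):
--     paths = [f.replace("\\", "/") for f in changedFiles]
--     ids = [c.get("id", "") for c in cases]
--     if any(k in p for p in paths for k in _STAR_TRIGGERS):
--         return ids
--     prefixes = [pre for pre, keys in _PREFIX_TRIGGERS
--                 if any(k in p for p in paths for k in keys)]
--     return [cid for cid in ids if any(cid.startswith(pre) for pre in prefixes)]
-- ===== Notes on version B (the rewrite author's own statement) =====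
-- stated objective: idiomatic
-- what changed: Replaces the pattern-set accumulation plus per-case fnmatch loop with an inverted index from case-id prefix to its trigger files, so matching is a plain startswith over at most three precomputed prefixes (no fnmatch, no set building).
import Mathlib
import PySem

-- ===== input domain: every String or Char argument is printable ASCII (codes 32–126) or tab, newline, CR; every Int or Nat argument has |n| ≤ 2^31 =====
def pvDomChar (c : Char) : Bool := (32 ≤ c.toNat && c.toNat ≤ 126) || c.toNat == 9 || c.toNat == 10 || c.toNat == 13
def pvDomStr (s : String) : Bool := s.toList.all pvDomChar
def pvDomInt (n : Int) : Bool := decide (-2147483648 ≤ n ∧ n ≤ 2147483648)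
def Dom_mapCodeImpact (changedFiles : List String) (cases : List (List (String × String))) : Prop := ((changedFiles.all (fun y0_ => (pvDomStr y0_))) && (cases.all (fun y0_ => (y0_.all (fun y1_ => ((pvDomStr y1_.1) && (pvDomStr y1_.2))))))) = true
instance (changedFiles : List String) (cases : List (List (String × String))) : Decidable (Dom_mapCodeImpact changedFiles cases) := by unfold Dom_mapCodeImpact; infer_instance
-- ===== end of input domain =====

-- B replaces A's pattern-set accumulation + per-case fnmatch with an inverted index
-- (case-id prefix -> trigger files) and plain startswith: idiomatic, no fnmatch needed.

-- ===== PORT A =====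
def fileCaseImpact : List (String × List String) := [
  ("context/builder.py", ["*"]),
  ("context/finance_context.py", ["analyst.*", "investor.*", "accountant.*"]),
  ("conversation/templates/analysis_rules.py", ["*"]),
  ("conversation/prompts.py", ["*"]),
  ("runtime/pipeline.py", ["analyst.*", "investor.*", "accountant.*"]),
  ("tools/recipes.py", ["analyst.*", "investor.*"]),
  ("tools/defaults/analysis.py", ["analyst.*", "investor.*"]),
  ("tools/defaults/market.py", ["investor.*", "analyst.*"])]

-- hand port of fnmatch.fnmatch (PySem has no fnmatch): exact on a case-sensitive
-- (posix) platform for patterns without '[' character classes — every pattern fed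
-- to it here is literal chars + '*', so this is exact on all admitted inputs.
def fnmatchChars : List Char → List Char → Bool
  | [], s => s.isEmpty
  | p :: ps, s =>
    if p = '*' then
      fnmatchChars ps s ||
        (match s with
         | [] => false
         | _ :: t => fnmatchChars (p :: ps) t)
    else
      match s with
      | [] => false
      | c :: t => (p == '?' || p == c) && fnmatchChars ps t
termination_by p s => (s.length, p.length)

def pyFnmatch (name pat : String) : Bool := fnmatchChars pat.toList name.toList

def mapCodeImpact (changedFiles : List String) (cases : List (List (String × String))) : List String :=
  let impactPatterns : PySem.Set String :=
    changedFiles.foldl (fun s f =>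
      fileCaseImpact.foldl (fun s kp =>
        if PySem.Str.isIn kp.1 (PySem.Str.replace f "\\" "/") then PySem.Set.update s kp.2
        else s) s)
      PySem.Set.empty
  if PySem.Set.contains impactPatterns "*" then
    cases.map (fun c => PySem.Dict.getD (PySem.Dict.mk c) "id" "")
  else
    -- 'for pat in impactPatterns: … break' appends caseId on the first match:
    -- the result is independent of the set's iteration order (it is an 'any')
    cases.foldl (fun impacted c =>
      let caseId := PySem.Dict.getD (PySem.Dict.mk c) "id" ""
      if impactPatterns.any (fun pat => pyFnmatch caseId pat) then impacted ++ [caseId]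
      else impacted) []

-- ===== PORT B =====
def starTriggers : List String := [
  "context/builder.py",
  "conversation/templates/analysis_rules.py",
  "conversation/prompts.py"]

def prefixTriggers : List (String × List String) := [
  ("analyst.", ["context/finance_context.py", "runtime/pipeline.py",
                "tools/recipes.py", "tools/defaults/analysis.py",
                "tools/defaults/market.py"]),
  ("investor.", ["context/finance_context.py", "runtime/pipeline.py",
                 "tools/recipes.py", "tools/defaults/analysis.py",
                 "tools/defaults/market.py"]),
  ("accountant.", ["context/finance_context.py", "runtime/pipeline.py"])]

def mapCodeImpact_alt (changedFiles : List String) (cases : List (List (String × String))) : List String :=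
  let paths := changedFiles.map (fun f => PySem.Str.replace f "\\" "/")
  let ids := cases.map (fun c => PySem.Dict.getD (PySem.Dict.mk c) "id" "")
  if paths.any (fun p => starTriggers.any (fun k => PySem.Str.isIn k p)) then ids
  else
    let prefixes := prefixTriggers.filterMap (fun pk =>
      if paths.any (fun p => pk.2.any (fun k => PySem.Str.isIn k p)) then some pk.1 else none)
    ids.filter (fun cid => prefixes.any (fun pre => PySem.Str.startswith cid pre))

-- ===== PRECONDITION & SPEC =====
def Spec_mapCodeImpact (changedFiles : List String) (cases : List (List (String × String))) (out : List String) : Prop := out = mapCodeImpact_alt changedFiles cases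
instance (changedFiles : List String) (cases : List (List (String × String))) (out : List String) : Decidable (Spec_mapCodeImpact changedFiles cases out) := by unfold Spec_mapCodeImpact; infer_instance

-- ===== CLAIM (what is proved, stated in full; the proofs are below) =====
def Claim_equal_mapCodeImpact : Prop := ∀ (changedFiles : List String) (cases : List (List (String × String))), Dom_mapCodeImpact changedFiles cases → Spec_mapCodeImpact changedFiles cases (mapCodeImpact changedFiles cases)

-- ===== LEMMAS AND PROOFS =====

-- case-by-case unfolding lemmas for the hand-ported fnmatch matcher
theorem fnmatch_cons_cons (p : Char) (ps : List Char) (c : Char) (t : List Char) (h : p ≠ '*') :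
    fnmatchChars (p :: ps) (c :: t) = ((p == '?' || p == c) && fnmatchChars ps t) := by
  conv_lhs => rw [fnmatchChars]
  rw [if_neg h]

theorem fnmatch_cons_nil (p : Char) (ps : List Char) (h : p ≠ '*') :
    fnmatchChars (p :: ps) [] = false := by
  conv_lhs => rw [fnmatchChars]
  rw [if_neg h]

theorem fnmatch_star (s : List Char) : fnmatchChars ['*'] s = true := by
  induction s with
  | nil => simp [fnmatchChars]
  | cons c t ih => simp [fnmatchChars, ih]

-- a literal prefix followed by '*' fnmatches exactly the strings with that prefix
theorem fnmatch_lit_star (lit s : List Char) (h : ∀ c ∈ lit, c ≠ '*' ∧ c ≠ '?') :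
    fnmatchChars (lit ++ ['*']) s = lit.isPrefixOf s := by
  induction lit generalizing s with
  | nil => simpa [List.isPrefixOf] using fnmatch_star s
  | cons c lit ih =>
    have hc := h c (by simp)
    cases s with
    | nil => simp [List.cons_append, fnmatch_cons_nil _ _ hc.1, List.isPrefixOf]
    | cons d t =>
      rw [List.cons_append, fnmatch_cons_cons _ _ _ _ hc.1,
        ih t (fun x hx => h x (by simp [hx]))]
      have h2 : (c == '?') = false := by simpa using hc.2
      simp only [List.isPrefixOf, h2, Bool.false_or]

theorem pyFnmatch_eq_startswith (cid pre pat : String)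
    (hpat : pat.toList = pre.toList ++ ['*'])
    (hpre : ∀ c ∈ pre.toList, c ≠ '*' ∧ c ≠ '?') :
    pyFnmatch cid pat = PySem.Str.startswith cid pre := by
  rw [Bool.eq_iff_iff]
  unfold pyFnmatch
  rw [hpat, fnmatch_lit_star _ _ hpre, List.isPrefixOf_iff_prefix,
    PySem.Str.startswith_eq, PySem.Chars.startswith_iff]

-- membership in the set built by A's inner loop over the fixed table
theorem mem_foldl_updIf (L : List (String × List String)) (s : PySem.Set String)
    (q : String × List String → Bool) (x : String) :
    x ∈ L.foldl (fun s kp => if q kp then PySem.Set.update s kp.2 else s) s ↔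
      x ∈ s ∨ ∃ kp ∈ L, q kp ∧ x ∈ kp.2 := by
  induction L generalizing s with
  | nil => simp
  | cons kp L ih =>
    simp only [List.foldl_cons]
    by_cases h : q kp = true
    · rw [if_pos h, ih]
      simp only [PySem.Set.mem_update, List.mem_cons]
      constructor
      · rintro ((hx | hx) | ⟨a, ha, hq, hm⟩)
        · exact Or.inl hx
        · exact Or.inr ⟨kp, Or.inl rfl, h, hx⟩
        · exact Or.inr ⟨a, Or.inr ha, hq, hm⟩
      · rintro (hx | ⟨a, ha | ha, hq, hm⟩)
        · exact Or.inl (Or.inl hx)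
        · subst ha; exact Or.inl (Or.inr hm)
        · exact Or.inr ⟨a, ha, hq, hm⟩
    · rw [if_neg h, ih]
      simp only [List.mem_cons]
      constructor
      · rintro (hx | ⟨a, ha, hq, hm⟩)
        · exact Or.inl hx
        · exact Or.inr ⟨a, Or.inr ha, hq, hm⟩
      · rintro (hx | ⟨a, ha | ha, hq, hm⟩)
        · exact Or.inl hx
        · subst ha; exact absurd hq h
        · exact Or.inr ⟨a, ha, hq, hm⟩

-- membership in the set built by A's double loop
theorem mem_patternSet (files : List String) (s : PySem.Set String) (x : String) :
    x ∈ files.foldl (fun s f =>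
        fileCaseImpact.foldl (fun s kp =>
          if PySem.Str.isIn kp.1 (PySem.Str.replace f "\\" "/") then PySem.Set.update s kp.2
          else s) s) s ↔
      x ∈ s ∨ ∃ f ∈ files, ∃ kp ∈ fileCaseImpact,
        PySem.Str.isIn kp.1 (PySem.Str.replace f "\\" "/") = true ∧ x ∈ kp.2 := by
  induction files generalizing s with
  | nil => simp
  | cons f fs ih =>
    simp only [List.foldl_cons]
    rw [ih, mem_foldl_updIf]
    simp only [List.mem_cons]
    constructor
    · rintro ((hx | ⟨kp, hkp, hq, hm⟩) | ⟨f', hf', rest⟩)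
      · exact Or.inl hx
      · exact Or.inr ⟨f, Or.inl rfl, kp, hkp, hq, hm⟩
      · exact Or.inr ⟨f', Or.inr hf', rest⟩
    · rintro (hx | ⟨f', hf' | hf', rest⟩)
      · exact Or.inl (Or.inl hx)
      · subst hf'; exact Or.inl (Or.inr rest)
      · exact Or.inr ⟨f', hf', rest⟩

-- any over a filterMap-of-if list
theorem any_filterMap_if {A B : Type} (L : List A) (c : A → Bool) (f : A → B) (q : B → Bool) :
    (L.filterMap (fun x => if c x then some (f x) else none)).any q
      = L.any (fun x => c x && q (f x)) := by
  induction L with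
  | nil => simp
  | cons a L ih =>
    by_cases h : c a = true <;> simp [h, ih]


theorem noWild (pre : String) (h : pre.toList.all (fun c => !(c == '*') && !(c == '?')) = true) :
    ∀ c ∈ pre.toList, c ≠ '*' ∧ c ≠ '?' := by
  intro c hc
  simpa using List.all_eq_true.mp h c hc

theorem eAn (cid : String) : pyFnmatch cid "analyst.*" = PySem.Str.startswith cid "analyst." :=
  pyFnmatch_eq_startswith cid _ _ rfl (noWild _ (by decide))
theorem eInv (cid : String) : pyFnmatch cid "investor.*" = PySem.Str.startswith cid "investor." :=
  pyFnmatch_eq_startswith cid _ _ rfl (noWild _ (by decide))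
theorem eAcc (cid : String) : pyFnmatch cid "accountant.*" = PySem.Str.startswith cid "accountant." :=
  pyFnmatch_eq_startswith cid _ _ rfl (noWild _ (by decide))

theorem star_contra (files : List String) (f : String) (hf : f ∈ files) (k : String)
    (hk : k ∈ starTriggers)
    (hin : PySem.Str.isIn k (PySem.Str.replace f "\\" "/") = true)
    (hns : ((files.map (fun f => PySem.Str.replace f "\\" "/")).any (fun p => starTriggers.any (fun k => PySem.Str.isIn k p))) = false) : False := by
  rw [List.any_eq_false] at hns
  exact absurd (List.any_eq_true.mpr ⟨k, hk, hin⟩) (hns _ (List.mem_map_of_mem hf))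

theorem rhs_intro (files : List String) (cid : String) (pre : String) (keys : List String)
    (hpk : (pre, keys) ∈ prefixTriggers)
    (f : String) (hf : f ∈ files) (k : String) (hk : k ∈ keys)
    (hin : PySem.Str.isIn k (PySem.Str.replace f "\\" "/") = true)
    (hsw : PySem.Str.startswith cid pre = true) :
    ∃ pk ∈ prefixTriggers,
      ((files.map (fun f => PySem.Str.replace f "\\" "/")).any
          (fun p => pk.2.any (fun k => PySem.Str.isIn k p))
        && PySem.Str.startswith cid pk.1) = true := by
  refine ⟨(pre, keys), hpk, ?_⟩
  rw [Bool.and_eq_true]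
  refine ⟨?_, hsw⟩
  rw [List.any_eq_true]
  exact ⟨_, List.mem_map_of_mem hf, by rw [List.any_eq_true]; exact ⟨k, hk, hin⟩⟩

theorem lhs_intro (files : List String) (cid : String) (pat key : String) (pats : List String)
    (hentry : (key, pats) ∈ fileCaseImpact) (hpmem : pat ∈ pats)
    (f : String) (hf : f ∈ files)
    (hin : PySem.Str.isIn key (PySem.Str.replace f "\\" "/") = true)
    (hfn : pyFnmatch cid pat = true) :
    (files.foldl (fun s f => fileCaseImpact.foldl (fun s kp => if PySem.Str.isIn kp.1 (PySem.Str.replace f "\\" "/") then PySem.Set.update s kp.2 else s) s) PySem.Set.empty).any (fun pat => pyFnmatch cid pat) = true := by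
  rw [List.any_eq_true]
  exact ⟨pat, (mem_patternSet files PySem.Set.empty pat).mpr
    (Or.inr ⟨f, hf, (key, pats), hentry, hin, hpmem⟩), hfn⟩

theorem any_patterns_eq (files : List String) (cid : String)
    (hns : ((files.map (fun f => PySem.Str.replace f "\\" "/")).any (fun p => starTriggers.any (fun k => PySem.Str.isIn k p))) = false) :
    (files.foldl (fun s f => fileCaseImpact.foldl (fun s kp => if PySem.Str.isIn kp.1 (PySem.Str.replace f "\\" "/") then PySem.Set.update s kp.2 else s) s) PySem.Set.empty).any (fun pat => pyFnmatch cid pat)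
    = (prefixTriggers.filterMap (fun pk => if (files.map (fun f => PySem.Str.replace f "\\" "/")).any (fun p => pk.2.any (fun k => PySem.Str.isIn k p)) then some pk.1 else none)).any (fun pre => PySem.Str.startswith cid pre) := by
  rw [Bool.eq_iff_iff, any_filterMap_if]
  constructor
  · intro h
    rw [List.any_eq_true] at h ⊢
    obtain ⟨pat, hpat, hfn⟩ := h
    rw [mem_patternSet] at hpat
    simp only [PySem.Set.empty, List.not_mem_nil, false_or] at hpat
    obtain ⟨f, hf, kp, hkp, hin, hmem⟩ := hpat
    simp only [fileCaseImpact, List.mem_cons, List.not_mem_nil, or_false] at hkp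
    rcases hkp with rfl | rfl | rfl | rfl | rfl | rfl | rfl | rfl <;>
      simp only [List.mem_cons, List.not_mem_nil, or_false] at hmem hin <;>
      [skip; skip; skip; skip; skip; skip; skip; skip]
    · exact absurd (star_contra files f hf _ (by simp [starTriggers]) hin hns) (fun h => h)
    · rcases hmem with rfl | rfl | rfl
      · exact rhs_intro files cid "analyst." ["context/finance_context.py", "runtime/pipeline.py", "tools/recipes.py", "tools/defaults/analysis.py", "tools/defaults/market.py"] (by simp [prefixTriggers]) f hf _ (by simp) hin (by rw [← eAn]; exact hfn)
      · exact rhs_intro files cid "investor." ["context/finance_context.py", "runtime/pipeline.py", "tools/recipes.py", "tools/defaults/analysis.py", "tools/defaults/market.py"] (by simp [prefixTriggers]) f hf _ (by simp) hin (by rw [← eInv]; exact hfn)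
      · exact rhs_intro files cid "accountant." ["context/finance_context.py", "runtime/pipeline.py"] (by simp [prefixTriggers]) f hf _ (by simp) hin (by rw [← eAcc]; exact hfn)
    · exact absurd (star_contra files f hf _ (by simp [starTriggers]) hin hns) (fun h => h)
    · exact absurd (star_contra files f hf _ (by simp [starTriggers]) hin hns) (fun h => h)
    · rcases hmem with rfl | rfl | rfl
      · exact rhs_intro files cid "analyst." ["context/finance_context.py", "runtime/pipeline.py", "tools/recipes.py", "tools/defaults/analysis.py", "tools/defaults/market.py"] (by simp [prefixTriggers]) f hf _ (by simp) hin (by rw [← eAn]; exact hfn)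
      · exact rhs_intro files cid "investor." ["context/finance_context.py", "runtime/pipeline.py", "tools/recipes.py", "tools/defaults/analysis.py", "tools/defaults/market.py"] (by simp [prefixTriggers]) f hf _ (by simp) hin (by rw [← eInv]; exact hfn)
      · exact rhs_intro files cid "accountant." ["context/finance_context.py", "runtime/pipeline.py"] (by simp [prefixTriggers]) f hf _ (by simp) hin (by rw [← eAcc]; exact hfn)
    · rcases hmem with rfl | rfl
      · exact rhs_intro files cid "analyst." ["context/finance_context.py", "runtime/pipeline.py", "tools/recipes.py", "tools/defaults/analysis.py", "tools/defaults/market.py"] (by simp [prefixTriggers]) f hf _ (by simp) hin (by rw [← eAn]; exact hfn)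
      · exact rhs_intro files cid "investor." ["context/finance_context.py", "runtime/pipeline.py", "tools/recipes.py", "tools/defaults/analysis.py", "tools/defaults/market.py"] (by simp [prefixTriggers]) f hf _ (by simp) hin (by rw [← eInv]; exact hfn)
    · rcases hmem with rfl | rfl
      · exact rhs_intro files cid "analyst." ["context/finance_context.py", "runtime/pipeline.py", "tools/recipes.py", "tools/defaults/analysis.py", "tools/defaults/market.py"] (by simp [prefixTriggers]) f hf _ (by simp) hin (by rw [← eAn]; exact hfn)
      · exact rhs_intro files cid "investor." ["context/finance_context.py", "runtime/pipeline.py", "tools/recipes.py", "tools/defaults/analysis.py", "tools/defaults/market.py"] (by simp [prefixTriggers]) f hf _ (by simp) hin (by rw [← eInv]; exact hfn)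
    · rcases hmem with rfl | rfl
      · exact rhs_intro files cid "investor." ["context/finance_context.py", "runtime/pipeline.py", "tools/recipes.py", "tools/defaults/analysis.py", "tools/defaults/market.py"] (by simp [prefixTriggers]) f hf _ (by simp) hin (by rw [← eInv]; exact hfn)
      · exact rhs_intro files cid "analyst." ["context/finance_context.py", "runtime/pipeline.py", "tools/recipes.py", "tools/defaults/analysis.py", "tools/defaults/market.py"] (by simp [prefixTriggers]) f hf _ (by simp) hin (by rw [← eAn]; exact hfn)
  · intro h
    rw [List.any_eq_true] at h
    obtain ⟨pk, hpk, hcond⟩ := h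
    rw [Bool.and_eq_true] at hcond
    obtain ⟨hc, hsw⟩ := hcond
    rw [List.any_eq_true] at hc
    obtain ⟨p, hp, hkin⟩ := hc
    rw [List.mem_map] at hp
    obtain ⟨f, hf, rfl⟩ := hp
    rw [List.any_eq_true] at hkin
    obtain ⟨k, hk, hin⟩ := hkin
    simp only [prefixTriggers, List.mem_cons, List.not_mem_nil, or_false] at hpk
    rcases hpk with rfl | rfl | rfl <;>
      simp only [List.mem_cons, List.not_mem_nil, or_false] at hk hsw
    · rcases hk with rfl | rfl | rfl | rfl | rfl
      · exact lhs_intro files cid "analyst.*" "context/finance_context.py" ["analyst.*", "investor.*", "accountant.*"] (by simp [fileCaseImpact]) (by simp) f hf hin (by rw [eAn]; exact hsw)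
      · exact lhs_intro files cid "analyst.*" "runtime/pipeline.py" ["analyst.*", "investor.*", "accountant.*"] (by simp [fileCaseImpact]) (by simp) f hf hin (by rw [eAn]; exact hsw)
      · exact lhs_intro files cid "analyst.*" "tools/recipes.py" ["analyst.*", "investor.*"] (by simp [fileCaseImpact]) (by simp) f hf hin (by rw [eAn]; exact hsw)
      · exact lhs_intro files cid "analyst.*" "tools/defaults/analysis.py" ["analyst.*", "investor.*"] (by simp [fileCaseImpact]) (by simp) f hf hin (by rw [eAn]; exact hsw)
      · exact lhs_intro files cid "analyst.*" "tools/defaults/market.py" ["investor.*", "analyst.*"] (by simp [fileCaseImpact]) (by simp) f hf hin (by rw [eAn]; exact hsw)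
    · rcases hk with rfl | rfl | rfl | rfl | rfl
      · exact lhs_intro files cid "investor.*" "context/finance_context.py" ["analyst.*", "investor.*", "accountant.*"] (by simp [fileCaseImpact]) (by simp) f hf hin (by rw [eInv]; exact hsw)
      · exact lhs_intro files cid "investor.*" "runtime/pipeline.py" ["analyst.*", "investor.*", "accountant.*"] (by simp [fileCaseImpact]) (by simp) f hf hin (by rw [eInv]; exact hsw)
      · exact lhs_intro files cid "investor.*" "tools/recipes.py" ["analyst.*", "investor.*"] (by simp [fileCaseImpact]) (by simp) f hf hin (by rw [eInv]; exact hsw)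
      · exact lhs_intro files cid "investor.*" "tools/defaults/analysis.py" ["analyst.*", "investor.*"] (by simp [fileCaseImpact]) (by simp) f hf hin (by rw [eInv]; exact hsw)
      · exact lhs_intro files cid "investor.*" "tools/defaults/market.py" ["investor.*", "analyst.*"] (by simp [fileCaseImpact]) (by simp) f hf hin (by rw [eInv]; exact hsw)
    · rcases hk with rfl | rfl
      · exact lhs_intro files cid "accountant.*" "context/finance_context.py" ["analyst.*", "investor.*", "accountant.*"] (by simp [fileCaseImpact]) (by simp) f hf hin (by rw [eAcc]; exact hsw)
      · exact lhs_intro files cid "accountant.*" "runtime/pipeline.py" ["analyst.*", "investor.*", "accountant.*"] (by simp [fileCaseImpact]) (by simp) f hf hin (by rw [eAcc]; exact hsw)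

theorem star_cond_eq (files : List String) :
    PySem.Set.contains (files.foldl (fun s f => fileCaseImpact.foldl (fun s kp => if PySem.Str.isIn kp.1 (PySem.Str.replace f "\\" "/") then PySem.Set.update s kp.2 else s) s) PySem.Set.empty) "*"
    = (files.map (fun f => PySem.Str.replace f "\\" "/")).any (fun p => starTriggers.any (fun k => PySem.Str.isIn k p)) := by
  rw [Bool.eq_iff_iff, PySem.Set.contains_iff, mem_patternSet]
  simp [fileCaseImpact, starTriggers, List.any_eq_true]

-- ===== VERDICT (by name: the statement is the Claim_ definition above) =====
theorem mapCodeImpact_spec : Claim_equal_mapCodeImpact := by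
  intro files cases _
  show mapCodeImpact files cases = mapCodeImpact_alt files cases
  simp only [mapCodeImpact, mapCodeImpact_alt]
  rw [star_cond_eq files]
  by_cases h : (files.map (fun f => PySem.Str.replace f "\\" "/")).any (fun p => starTriggers.any (fun k => PySem.Str.isIn k p)) = true
  · rw [if_pos h, if_pos h]
  · rw [if_neg h, if_neg h]
    have hns := Bool.not_eq_true _ ▸ h
    rw [PySem.List.foldl_append_if
        (p := fun c => (files.foldl (fun s f => fileCaseImpact.foldl (fun s kp => if PySem.Str.isIn kp.1 (PySem.Str.replace f "\\" "/") then PySem.Set.update s kp.2 else s) s) PySem.Set.empty).any (fun pat => pyFnmatch (PySem.Dict.getD (PySem.Dict.mk c) "id" "") pat))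
        (f := fun c => PySem.Dict.getD (PySem.Dict.mk c) "id" "")]
    rw [List.nil_append, List.filter_map]
    congr 1
    apply List.filter_congr
    intro c _
    show _ = ((fun cid => (prefixTriggers.filterMap (fun pk => if (files.map (fun f => PySem.Str.replace f "\\" "/")).any (fun p => pk.2.any (fun k => PySem.Str.isIn k p)) then some pk.1 else none)).any (fun pre => PySem.Str.startswith cid pre)) ∘ (fun c => PySem.Dict.getD (PySem.Dict.mk c) "id" "")) c
    exact any_patterns_eq files _ hns
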